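-- pv_equiv track=rewrite | github.com/dlparker/palaver | scripts/cmd_tool.py | clean_text_with_mapping
-- ===== SOURCE A (Python) =====
-- import string
--
-- def clean_text_with_mapping(text: str) -> tuple[str, list[int]]:
--     """
--     Clean text (lowercase + strip punctuation) and return cleaned string + list of original indices for each kept char.
--     """
--     cleaned = []
--     mapping = []  # Original positions for each char in cleaned
--     for i, char in enumerate(text):
--         lower_char = char.lower()
--         if lower_char not in string.punctuation:  # Keep non-punct (after lower)
--             cleaned.append(lower_char)
--             mapping.append(i)  # Record original index
--     return "".join(cleaned), mapping
-- ===== SOURCE B (Python) =====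
-- import string
--
-- def clean_text_with_mapping(text: str) -> tuple[str, list[int]]:
--     """
--     Clean text (lowercase + strip punctuation) and return cleaned string + list of original indices.
--     Different algorithm: lower the whole text once, then for each of the 32 punctuation
--     characters collect the set of positions where it occurs; the kept indices are the
--     complement of that union, and the cleaned string is read off those positions.
--     (Exact on the task's printable-ASCII domain, where str.lower is per-character.)
--     """
--     low = text.lower()
--     bad = set()
--     for p in string.punctuation:
--         for i, c in enumerate(low):
--             if c == p:
--                 bad.add(i)
--     mapping = [i for i in range(len(low)) if i not in bad]
--     cleaned = ''.join(low[i] for i in mapping)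
--     return cleaned, mapping
-- ===== Notes on version B (the rewrite author's own statement) =====
-- stated objective: alternative
-- what changed: Instead of one simultaneous filter loop appending to two accumulators, B lowers the whole text once, then scans per punctuation character collecting the set of punctuation positions, and derives the mapping as the complement of that set over range(len) and the cleaned string by indexing back into the lowered text.
import Mathlib
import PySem

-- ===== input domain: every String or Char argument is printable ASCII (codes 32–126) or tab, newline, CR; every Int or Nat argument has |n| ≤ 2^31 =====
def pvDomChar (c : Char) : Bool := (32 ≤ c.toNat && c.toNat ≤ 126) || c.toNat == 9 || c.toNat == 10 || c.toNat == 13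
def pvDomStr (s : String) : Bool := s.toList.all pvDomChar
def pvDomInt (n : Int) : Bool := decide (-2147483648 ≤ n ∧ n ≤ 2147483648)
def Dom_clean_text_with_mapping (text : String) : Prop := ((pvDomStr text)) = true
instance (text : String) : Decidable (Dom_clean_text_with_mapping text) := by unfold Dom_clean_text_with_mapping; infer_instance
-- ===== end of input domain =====

-- ===== PORT A =====
-- B reconstructs the same result from a punctuation-position set; return value only, no mutation involved.
-- string.punctuation as a list of characters; Python's `lower_char in string.punctuation`
-- is a substring test on a one-character string, which is exactly list membership here.
def pvPunct : List Char := "!\"#$%&'()*+,-./:;<=>?@[\\]^_`{|}~".toList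

def clean_text_with_mapping (text : String) : String × List Int :=
  let r := (PySem.List.enumerate text.toList).foldl
    (fun (st : List Char × List Int) p =>
      let lc := PySem.Chars.lowerChar p.2
      if lc ∈ pvPunct then st else (st.1 ++ [lc], st.2 ++ [p.1]))
    ([], [])
  (String.mk r.1, r.2)

-- ===== PORT B =====
-- low[i] / text indexing is totalized with pyGetD and default ' '; mapping holds only in-range indices
def clean_text_with_mapping_alt (text : String) : String × List Int :=
  let low := PySem.Chars.lower text.toList
  let bad := pvPunct.foldl
    (fun (bad : PySem.Set Int) p =>
      (PySem.List.enumerate low).foldl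
        (fun (bad : PySem.Set Int) q => if q.2 = p then PySem.Set.add bad q.1 else bad) bad)
    PySem.Set.empty
  let mapping := (PySem.List.pyRange 0 (low.length : Int) 1).filter
      (fun i => !(PySem.Set.contains bad i))
  let cleaned := mapping.map (fun i => PySem.List.pyGetD low i ' ')
  (String.mk cleaned, mapping)

-- ===== PRECONDITION & SPEC =====
def Spec_clean_text_with_mapping (text : String) (out : String × List Int) : Prop := out = clean_text_with_mapping_alt text
instance (text : String) (out : String × List Int) : Decidable (Spec_clean_text_with_mapping text out) := by unfold Spec_clean_text_with_mapping; infer_instance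

-- ===== CLAIM (what is proved, stated in full; the proofs are below) =====
def Claim_equal_clean_text_with_mapping : Prop := ∀ (text : String), Dom_clean_text_with_mapping text → Spec_clean_text_with_mapping text (clean_text_with_mapping text)

-- ===== LEMMAS AND PROOFS =====

-- A's loop, run from any accumulators, appends exactly the filter/map of the remaining pairs.
lemma pv_foldl_char (l : List (Int × Char)) (c : List Char) (m : List Int) :
    l.foldl (fun (st : List Char × List Int) p =>
      let lc := PySem.Chars.lowerChar p.2
      if lc ∈ pvPunct then st else (st.1 ++ [lc], st.2 ++ [p.1])) (c, m)
    = (c ++ (l.filter (fun p => !(PySem.Chars.lowerChar p.2 ∈ pvPunct))).map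
          (fun p => PySem.Chars.lowerChar p.2),
       m ++ (l.filter (fun p => !(PySem.Chars.lowerChar p.2 ∈ pvPunct))).map (·.1)) := by
  induction l generalizing c m with
  | nil => simp
  | cons p l ih =>
      by_cases h : PySem.Chars.lowerChar p.2 ∈ pvPunct <;>
        simp [List.foldl_cons, h, ih]

-- membership in the inner position-collecting fold of B (one punctuation character p)
lemma pv_mem_inner (l : List (Int × Char)) (p : Char) (s : PySem.Set Int) (y : Int) :
    y ∈ l.foldl
      (fun (bad : PySem.Set Int) q => if q.2 = p then PySem.Set.add bad q.1 else bad) s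
    ↔ y ∈ s ∨ ∃ q ∈ l, q.2 = p ∧ y = q.1 := by
  induction l generalizing s with
  | nil => simp
  | cons q l ih =>
      by_cases h : q.2 = p <;>
        · simp [h, ih, PySem.Set.mem_add]
          try tauto

-- membership in B's full `bad` set
lemma pv_mem_bad (low : List Char) (ps : List Char) (s : PySem.Set Int) (y : Int) :
    y ∈ ps.foldl
      (fun (bad : PySem.Set Int) p =>
        (PySem.List.enumerate low).foldl
          (fun (bad : PySem.Set Int) q => if q.2 = p then PySem.Set.add bad q.1 else bad) bad) s
    ↔ y ∈ s ∨ ∃ q ∈ PySem.List.enumerate low, q.2 ∈ ps ∧ y = q.1 := by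
  induction ps generalizing s with
  | nil => simp
  | cons p ps ih =>
      rw [List.foldl_cons, ih, pv_mem_inner]
      constructor
      · rintro ((h | ⟨q, hq, hp, rfl⟩) | ⟨q, hq, hp, rfl⟩)
        · exact Or.inl h
        · exact Or.inr ⟨q, hq, by simp [hp], rfl⟩
        · exact Or.inr ⟨q, hq, by simp [hp], rfl⟩
      · rintro (h | ⟨q, hq, hp, rfl⟩)
        · exact Or.inl (Or.inl h)
        · rcases List.mem_cons.mp hp with h | h
          · exact Or.inl (Or.inr ⟨q, hq, h, rfl⟩)
          · exact Or.inr ⟨q, hq, h, rfl⟩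

-- indexing into the lowered list is lowering the indexed character (any index)
lemma pv_getD_lower (cs : List Char) (i : Int) :
    PySem.List.pyGetD (PySem.Chars.lower cs) i ' '
    = PySem.Chars.lowerChar (PySem.List.pyGetD cs i ' ') := by
  have h := PySem.List.pyGetD_map PySem.Chars.lowerChar cs i ' '
  simpa [PySem.Chars.lower, show PySem.Chars.lowerChar ' ' = ' ' from rfl] using h

-- B's `bad` set holds exactly the in-range indices whose lowered character is punctuation
lemma pv_bad_iff (cs : List Char) (j : Int) (h0 : 0 ≤ j) (hjb : j < (cs.length : Int)) :
    j ∈ pvPunct.foldl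
      (fun (bad : PySem.Set Int) p =>
        (PySem.List.enumerate (PySem.Chars.lower cs)).foldl
          (fun (bad : PySem.Set Int) q => if q.2 = p then PySem.Set.add bad q.1 else bad) bad)
      PySem.Set.empty
    ↔ PySem.Chars.lowerChar (PySem.List.pyGetD cs j ' ') ∈ pvPunct := by
  have hlen : (PySem.Chars.lower cs).length = cs.length := by simp [PySem.Chars.lower]
  rw [pv_mem_bad]
  simp only [PySem.Set.empty, List.not_mem_nil, false_or]
  constructor
  · rintro ⟨q, hq, hp, rfl⟩
    rcases (PySem.List.mem_enumerate_iff _ _ _).mp hq with ⟨k, hk, rfl⟩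
    simp only [zero_add]
    have hk' : k < cs.length := hlen ▸ hk
    have hg : PySem.List.pyGetD cs (k : Int) ' ' = cs[k] := by
      rw [PySem.List.pyGetD_eq_getElem cs ' ' (by omega) (by exact_mod_cast hk')]
      simp
    rw [hg]
    have : (PySem.Chars.lower cs)[k] = PySem.Chars.lowerChar cs[k] := by
      simp [PySem.Chars.lower]
    rw [← this]; exact hp
  · intro hp
    have hk : j.toNat < (PySem.Chars.lower cs).length := by omega
    refine ⟨(j, (PySem.Chars.lower cs)[j.toNat]), ?_, ?_, rfl⟩
    · rw [PySem.List.mem_enumerate_iff]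
      exact ⟨j.toNat, hk, by simp; omega⟩
    · have hg : PySem.List.pyGetD cs j ' ' = cs[j.toNat]'(by omega) := by
        exact PySem.List.pyGetD_eq_getElem cs ' ' h0 hjb
      have : (PySem.Chars.lower cs)[j.toNat] = PySem.Chars.lowerChar (cs[j.toNat]'(by omega)) := by
        simp [PySem.Chars.lower]
      rw [this, ← hg]; exact hp

theorem pv_main (text : String) :
    clean_text_with_mapping text = clean_text_with_mapping_alt text := by
  unfold clean_text_with_mapping clean_text_with_mapping_alt
  rw [pv_foldl_char]
  simp only [List.nil_append]
  set cs := text.toList with hcs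
  set bad := pvPunct.foldl
    (fun (bad : PySem.Set Int) p =>
      (PySem.List.enumerate (PySem.Chars.lower cs)).foldl
        (fun (bad : PySem.Set Int) q => if q.2 = p then PySem.Set.add bad q.1 else bad) bad)
    PySem.Set.empty with hbaddef
  have hlen : (PySem.Chars.lower cs).length = cs.length := by simp [PySem.Chars.lower]
  -- rewrite A's enumerate through pyRange indexing
  rw [PySem.List.enumerate_eq_map_pyRange cs ' ', List.filter_map, List.map_map, List.map_map]
  have hl : PySem.List.len cs = ((PySem.Chars.lower cs).length : Int) := by
    simp [PySem.List.len, hlen]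
  -- the two index lists agree
  have hmap :
      List.map ((·.1) ∘ fun j => (j, PySem.List.pyGetD cs j ' '))
        (List.filter ((fun p => !(PySem.Chars.lowerChar p.2 ∈ pvPunct)) ∘
            fun j => (j, PySem.List.pyGetD cs j ' '))
          (PySem.List.pyRange 0 (PySem.List.len cs) 1))
      = (PySem.List.pyRange 0 ((PySem.Chars.lower cs).length : Int) 1).filter
          (fun i => !(PySem.Set.contains bad i)) := by
    rw [List.map_id'' (f := (·.1) ∘ fun j => (j, PySem.List.pyGetD cs j ' ')) (fun _ => rfl), hl]
    apply List.filter_congr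
    intro j hj
    rcases PySem.List.mem_pyRange_one.mp hj with ⟨h0, hjb⟩
    have hjb' : j < (cs.length : Int) := by omega
    have hiff := pv_bad_iff cs j h0 hjb'
    have hc : PySem.Set.contains bad j = decide (PySem.Chars.lowerChar (PySem.List.pyGetD cs j ' ') ∈ pvPunct) := by
      by_cases hm : PySem.Chars.lowerChar (PySem.List.pyGetD cs j ' ') ∈ pvPunct
      · simp [hm, hbaddef ▸ hiff.mpr hm]
      · simp only [hm, decide_false]
        rw [← Bool.not_eq_true, PySem.Set.contains_iff]
        exact fun hmem => hm (hiff.mp (hbaddef ▸ hmem))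
    simp only [Function.comp, hc]
  -- cleaned strings: both map lowering-and-indexing over the same index list
  refine congrArg₂ Prod.mk (congrArg String.mk ?_) hmap
  rw [show ((fun p => PySem.Chars.lowerChar p.2) ∘ fun j => (j, PySem.List.pyGetD cs j ' '))
        = fun j => PySem.Chars.lowerChar (PySem.List.pyGetD cs j ' ') from rfl]
  have hfun : (fun i => PySem.List.pyGetD (PySem.Chars.lower cs) i ' ')
      = fun i => PySem.Chars.lowerChar (PySem.List.pyGetD cs i ' ') := by
    funext i; exact pv_getD_lower cs i
  rw [hfun, ← hmap, List.map_map]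
  exact List.map_congr_left (fun p _ => rfl)

-- ===== VERDICT (by name: the statement is the Claim_ definition above) =====
theorem clean_text_with_mapping_spec : Claim_equal_clean_text_with_mapping := by
  intro text _
  exact pv_main text
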